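-- pv_equiv track=rewrite | github.com/SchubideiCroissant/Anhang-BA | typescript/src/core/variable_parser.py | sort_groups
-- ===== SOURCE A (Python) =====
-- def sort_groups(groups: dict) -> dict:
--     """Sortiert groups alphabetisch: erst FieldTypes, dann Variablen, dann Suffixe."""
--     sorted_groups = {}
--     for ft in sorted(groups.keys()):  # FieldTypes sortieren
--         vars_dict = groups[ft]
--         sorted_vars = {}
--         for var in sorted(vars_dict.keys()):  # Variablen sortieren
--             suffix_dict = vars_dict[var]
--             # Suffixe sortieren
--             sorted_suffixes = {suf: suffix_dict[suf] for suf in sorted(suffix_dict.keys())}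
--             sorted_vars[var] = sorted_suffixes
--         sorted_groups[ft] = sorted_vars
--     return sorted_groups
-- ===== SOURCE B (Python) =====
-- def sort_groups(groups: dict) -> dict:
--     """Sortiert groups alphabetisch: erst FieldTypes, dann Variablen, dann Suffixe."""
--     def sort_levels(d, depth):
--         if depth == 0:
--             return d
--         return {k: sort_levels(d[k], depth - 1) for k in sorted(d.keys())}
--     return sort_levels(groups, 3)
-- ===== Notes on version B (the rewrite author's own statement) =====
-- stated objective: simpler
-- what changed: Replaced the three explicitly nested sorting loops with one generic recursive level-sorter applied to depth 3, a single dict comprehension per level instead of hand-maintained accumulator dicts.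
import Mathlib
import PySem

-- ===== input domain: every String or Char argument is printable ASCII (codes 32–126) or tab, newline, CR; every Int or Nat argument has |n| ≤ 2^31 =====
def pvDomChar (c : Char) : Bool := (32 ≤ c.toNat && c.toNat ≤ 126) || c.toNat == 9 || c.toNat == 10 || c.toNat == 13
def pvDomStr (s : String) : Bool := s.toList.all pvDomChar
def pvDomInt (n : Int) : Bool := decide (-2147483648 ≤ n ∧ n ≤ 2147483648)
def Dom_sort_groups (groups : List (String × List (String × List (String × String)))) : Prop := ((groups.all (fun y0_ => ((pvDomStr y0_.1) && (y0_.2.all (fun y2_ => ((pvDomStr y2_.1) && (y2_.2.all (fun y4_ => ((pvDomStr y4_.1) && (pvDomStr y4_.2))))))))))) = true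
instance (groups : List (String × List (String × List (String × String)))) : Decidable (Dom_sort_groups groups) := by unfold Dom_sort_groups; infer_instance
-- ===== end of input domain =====

-- B replaces A's three hand-written nested sorting loops by one generic level-sorter applied three times (simpler decomposition; return value only, no mutation involved).

-- ===== PORT A =====
-- inner dict comprehension: {suf: suffix_dict[suf] for suf in sorted(suffix_dict.keys())}
-- (suffix_dict[suf] is ported as get? … |>.getD "": suf comes from suffix_dict's keys, so the lookup always succeeds — exact)
def pvA_suffixes (suffix_dict : List (String × String)) : List (String × String) :=
  ((PySem.List.sorted (PySem.Dict.mk suffix_dict).keys (fun x => x) false).foldl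
      (fun acc suf => acc.insert suf (((PySem.Dict.mk suffix_dict).get? suf).getD ""))
      PySem.Dict.empty).items

-- middle loop: for var in sorted(vars_dict.keys()): … sorted_vars[var] = sorted_suffixes
def pvA_vars (vars_dict : List (String × List (String × String))) : List (String × List (String × String)) :=
  ((PySem.List.sorted (PySem.Dict.mk vars_dict).keys (fun x => x) false).foldl
      (fun sorted_vars var =>
        sorted_vars.insert var (pvA_suffixes (((PySem.Dict.mk vars_dict).get? var).getD [])))
      PySem.Dict.empty).items

-- outer loop: for ft in sorted(groups.keys()): … sorted_groups[ft] = sorted_vars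
def sort_groups (groups : List (String × List (String × List (String × String)))) : List (String × List (String × List (String × String))) :=
  ((PySem.List.sorted (PySem.Dict.mk groups).keys (fun x => x) false).foldl
      (fun sorted_groups ft =>
        sorted_groups.insert ft (pvA_vars (((PySem.Dict.mk groups).get? ft).getD [])))
      PySem.Dict.empty).items

-- ===== PORT B =====
-- Source B's depth-indexed recursion sort_levels(d, depth): Lean needs a monomorphic type per depth,
-- so the recursive call 'sort_levels(·, depth-1)' is passed as the continuation f, and
-- sort_levels(groups, 3) becomes the three-fold instantiation below (depth 0 = id).
def pvSortLevel {α β : Type} [Inhabited α] (f : α → β) (d : List (String × α)) : List (String × β) :=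
  (PySem.List.sorted (PySem.Dict.mk d).keys (fun x => x) false).map
    (fun k => (k, f (((PySem.Dict.mk d).get? k).getD default)))

def sort_groups_alt (groups : List (String × List (String × List (String × String)))) : List (String × List (String × List (String × String))) :=
  pvSortLevel (pvSortLevel (pvSortLevel id)) groups

-- ===== PRECONDITION & SPEC =====
-- Pre_ states only that the argument really encodes Python dicts: keys are pairwise distinct at
-- every nesting level (Python dict keys are unique by construction, so this excludes no Python input).
def Pre_sort_groups (groups : List (String × List (String × List (String × String)))) : Prop :=
  (groups.map Prod.fst).Nodup ∧
  ∀ p ∈ groups, (p.2.map Prod.fst).Nodup ∧ ∀ q ∈ p.2, (q.2.map Prod.fst).Nodup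
instance (groups : List (String × List (String × List (String × String)))) : Decidable (Pre_sort_groups groups) := by unfold Pre_sort_groups; infer_instance

def pvWitness_sort_groups : (List (String × List (String × List (String × String)))) :=
  [("b", [("y", [("s", "1"), ("a", "2")]), ("x", [])]), ("a", [("q", [("z", "9")])])]

def Spec_sort_groups (groups : List (String × List (String × List (String × String)))) (out : List (String × List (String × List (String × String)))) : Prop := out = sort_groups_alt groups
instance (groups : List (String × List (String × List (String × String)))) (out : List (String × List (String × List (String × String)))) : Decidable (Spec_sort_groups groups out) := by unfold Spec_sort_groups; infer_instance

-- ===== CLAIM (what is proved, stated in full; the proofs are below) =====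
def Claim_equal_sort_groups : Prop := ∀ (groups : List (String × List (String × List (String × String)))), Dom_sort_groups groups → Pre_sort_groups groups → Spec_sort_groups groups (sort_groups groups)

-- ===== LEMMAS AND PROOFS =====

-- sorting a dict's Nodup keys keeps them Nodup
theorem pv_sorted_keys_nodup {α : Type} (d : List (String × α))
    (h : (d.map Prod.fst).Nodup) :
    (PySem.List.sorted (PySem.Dict.mk d).keys (fun x => x) false).Nodup := by
  refine ((PySem.List.sorted_perm ((PySem.Dict.mk d).keys) (fun x => x) false).symm.nodup) ?_
  simpa [PySem.Dict.keys] using h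

-- A's accumulator loop over the sorted (hence fresh, distinct) keys builds exactly the map B builds
theorem pv_level_items {α β : Type} (d : List (String × α)) (F : String → β)
    (h : (d.map Prod.fst).Nodup) :
    ((PySem.List.sorted (PySem.Dict.mk d).keys (fun x => x) false).foldl
        (fun acc k => acc.insert k (F k)) PySem.Dict.empty).items
      = (PySem.List.sorted (PySem.Dict.mk d).keys (fun x => x) false).map (fun k => (k, F k)) := by
  have := PySem.Dict.items_foldl_insert_fresh
      (l := PySem.List.sorted (PySem.Dict.mk d).keys (fun x => x) false)
      (k := fun a => a) (v := F) (d := (PySem.Dict.empty : PySem.Dict String β))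
      (by intro a _; exact PySem.Dict.contains_empty a)
      (by simpa using pv_sorted_keys_nodup d h)
  simpa using this

-- membership of a sorted key yields the underlying pair of the association list
theorem pv_lookup_mem {α : Type} (d : List (String × α)) (k : String)
    (h : (d.map Prod.fst).Nodup)
    (hk : k ∈ PySem.List.sorted (PySem.Dict.mk d).keys (fun x => x) false) :
    ∃ v, (k, v) ∈ d ∧ (PySem.Dict.mk d).get? k = some v := by
  have hk' : k ∈ (PySem.Dict.mk d).keys :=
    (PySem.List.mem_sorted ((PySem.Dict.mk d).keys) (fun x => x) false k).1 hk
  have hm : k ∈ d.map Prod.fst := by simpa [PySem.Dict.keys] using hk'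
  obtain ⟨p, hp, hpk⟩ := List.mem_map.1 hm
  have hmem : (k, p.2) ∈ d := by
    have : (p.1, p.2) ∈ d := by simpa using hp
    rwa [hpk] at this
  exact ⟨p.2, hmem,
    PySem.Dict.get?_of_mem_items _ (by simpa using hmem) (by simpa [PySem.Dict.keys] using h)⟩

-- innermost level: A's dict comprehension = B's depth-1 level
theorem pv_suffixes_eq (sd : List (String × String)) (h : (sd.map Prod.fst).Nodup) :
    pvA_suffixes sd = pvSortLevel id sd := by
  unfold pvA_suffixes pvSortLevel
  rw [pv_level_items sd (fun suf => ((PySem.Dict.mk sd).get? suf).getD "") h]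
  rfl

-- middle level: A's variable loop = B's depth-2 level
theorem pv_vars_eq (vd : List (String × List (String × String)))
    (h : (vd.map Prod.fst).Nodup)
    (hin : ∀ q ∈ vd, (q.2.map Prod.fst).Nodup) :
    pvA_vars vd = pvSortLevel (pvSortLevel id) vd := by
  unfold pvA_vars
  rw [pv_level_items vd (fun var => pvA_suffixes (((PySem.Dict.mk vd).get? var).getD [])) h]
  show _ = (PySem.List.sorted (PySem.Dict.mk vd).keys (fun x => x) false).map
      (fun k => (k, pvSortLevel id (((PySem.Dict.mk vd).get? k).getD default)))
  refine List.map_congr_left (fun k hk => ?_)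
  obtain ⟨v, hvmem, hvget⟩ := pv_lookup_mem vd k h hk
  simp only [hvget, Option.getD_some]
  exact congrArg _ (pv_suffixes_eq v (hin _ hvmem))

theorem sort_groups_spec : Claim_equal_sort_groups := by
  intro groups _ hpre
  obtain ⟨h1, h2⟩ := hpre
  unfold Spec_sort_groups sort_groups sort_groups_alt
  rw [pv_level_items groups (fun ft => pvA_vars (((PySem.Dict.mk groups).get? ft).getD [])) h1]
  show (PySem.List.sorted (PySem.Dict.mk groups).keys (fun x => x) false).map _
      = (PySem.List.sorted (PySem.Dict.mk groups).keys (fun x => x) false).map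
          (fun k => (k, pvSortLevel (pvSortLevel id) (((PySem.Dict.mk groups).get? k).getD default)))
  refine List.map_congr_left (fun k hk => ?_)
  obtain ⟨v, hvmem, hvget⟩ := pv_lookup_mem groups k h1 hk
  simp only [hvget, Option.getD_some]
  exact congrArg _ (pv_vars_eq v (h2 _ hvmem).1 (h2 _ hvmem).2)
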